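-- pv_equiv track=rewrite | github.com/KevinDalySmith/PyMoments | PyMoments/Combinatorics.py | simplex_iter
-- ===== SOURCE A (Python) =====
-- def simplex_iter(s, max_vals):
--     """
--     Generator over all tuples of integers (i1, i2, ..., id) with the following properties:
--         * i1 + i2 + ... + id = s
--         * i1, i2, ..., id >= 1
--         * ij <= max_vals[j]
--
--     Parameters
--     ----------
--     s : int
--         Sum to which the indices are constrained.
--     max_vals : sequence of positive ints
--         Maximum value that each mode of the index can take on.
--
--     Yields
--     ------
--     idx : tuple of ints
--         Index tuple satisfying the three properties above.
--     """
--     if s <= 0: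
--         return
--     elif len(max_vals) == 0:
--         return
--     elif len(max_vals) == 1:
--         if max_vals[0] >= s:
--             yield (s,)
--         else:
--             return
--     else:
--         for i in range(1, 1 + min(max_vals[0], s)):
--             for indices in simplex_iter(s - i, max_vals[1:]):
--                 yield (i,) + indices
-- ===== SOURCE B (Python) =====
-- def simplex_iter(s, max_vals):
--     # Pruned enumeration: at each depth, restrict i to the interval where the
--     # remaining sum is achievable (>= number of remaining parts and <= sum of
--     # their caps), so no dead branch is ever entered.
--     if s <= 0 or not max_vals:
--         return
--
--     def rec(rem, vals, tail_sum):
--         # vals nonempty; tail_sum == sum(vals[1:])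
--         m = vals[0]
--         rest = vals[1:]
--         lo = max(1, rem - tail_sum)
--         hi = min(m, rem - len(rest))
--         if not rest:
--             for i in range(lo, hi + 1):
--                 yield (i,)
--         else:
--             new_tail = tail_sum - rest[0]
--             for i in range(lo, hi + 1):
--                 for t in rec(rem - i, rest, new_tail):
--                     yield (i,) + t
--
--     yield from rec(s, list(max_vals), sum(max_vals[1:]))
-- ===== Notes on version B (the rewrite author's own statement) =====
-- stated objective: alternative
-- what changed: Instead of recursing over every i in 1..min(max0,s) and discarding branches whose subproblem turns out empty, B precomputes suffix sums of the caps and restricts i at each depth to the exact interval where the remaining sum is still achievable, so only feasible branches are explored.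
import Mathlib
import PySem

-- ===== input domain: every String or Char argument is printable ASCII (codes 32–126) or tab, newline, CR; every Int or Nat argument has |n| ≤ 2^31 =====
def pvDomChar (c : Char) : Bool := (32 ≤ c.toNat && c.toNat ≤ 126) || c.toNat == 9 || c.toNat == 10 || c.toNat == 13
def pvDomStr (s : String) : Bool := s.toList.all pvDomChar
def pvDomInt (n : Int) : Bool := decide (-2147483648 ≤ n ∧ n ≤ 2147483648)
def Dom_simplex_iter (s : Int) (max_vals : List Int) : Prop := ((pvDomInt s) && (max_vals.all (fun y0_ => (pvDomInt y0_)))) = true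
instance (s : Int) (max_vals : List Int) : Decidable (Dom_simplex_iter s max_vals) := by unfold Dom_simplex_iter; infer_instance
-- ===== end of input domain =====

-- B replaces A's blind recursion (which explores i-branches whose subproblem is empty)
-- by a pruned recursion: at each depth i ranges only over the interval where the
-- remaining sum is achievable given the remaining caps (suffix sums / counts).


-- ===== PORT A =====
def simplex_iter (s : Int) (max_vals : List Int) : List (List Int) :=
  if s ≤ 0 then []
  else
    match max_vals with
    | [] => []
    | [m] => if m ≥ s then [[s]] else []
    | m :: rest =>
        (PySem.List.pyRange 1 (1 + min m s) 1).flatMap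
          (fun i => (simplex_iter (s - i) rest).map (fun indices => i :: indices))

-- ===== PORT B =====
-- Source B's rec(rem, vals, tail_sum) with the nonempty vals split as head m :: rest
def simplex_iter_altRec (rem : Int) (m : Int) (rest : List Int) (tail_sum : Int) : List (List Int) :=
  match rest with
  | [] =>
      let lo := max 1 (rem - tail_sum)
      let hi := min m (rem - ([] : List Int).length)
      (PySem.List.pyRange lo (hi + 1) 1).map (fun i => [i])
  | r :: rest2 =>
      let lo := max 1 (rem - tail_sum)
      let hi := min m (rem - (r :: rest2).length)
      let new_tail := tail_sum - r
      (PySem.List.pyRange lo (hi + 1) 1).flatMap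
        (fun i => (simplex_iter_altRec (rem - i) r rest2 new_tail).map (fun t => i :: t))

def simplex_iter_alt (s : Int) (max_vals : List Int) : List (List Int) :=
  if s ≤ 0 then []
  else
    match max_vals with
    | [] => []
    | m :: rest => simplex_iter_altRec s m rest rest.sum

-- ===== PRECONDITION & SPEC =====
def Spec_simplex_iter (s : Int) (max_vals : List Int) (out : List (List Int)) : Prop := out = simplex_iter_alt s max_vals
instance (s : Int) (max_vals : List Int) (out : List (List Int)) : Decidable (Spec_simplex_iter s max_vals out) := by unfold Spec_simplex_iter; infer_instance

-- ===== CLAIM (what is proved, stated in full; the proofs are below) =====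
def Claim_equal_simplex_iter : Prop := ∀ (s : Int) (max_vals : List Int), Dom_simplex_iter s max_vals → Spec_simplex_iter s max_vals (simplex_iter s max_vals)

-- ===== LEMMAS AND PROOFS =====

-- A returns nothing when the target sum is infeasible for the caps
lemma simplex_iter_infeasible (mv : List Int) : ∀ s : Int,
    (s < (mv.length : Int) ∨ mv.sum < s) → simplex_iter s mv = [] := by
  induction mv with
  | nil =>
      intro s _
      unfold simplex_iter
      split <;> rfl
  | cons m rest ih =>
      intro s hs
      unfold simplex_iter
      split
      · rfl
      · rename_i hspos
        match rest with
        | [] =>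
            simp only [List.length_cons, List.length_nil, List.sum_cons, List.sum_nil] at hs
            have : ¬ m ≥ s := by omega
            simp [this]
        | r :: rest2 =>
            rw [List.flatMap_eq_nil_iff]
            intro i hi
            rw [PySem.List.mem_pyRange_one] at hi
            have : simplex_iter (s - i) (r :: rest2) = [] := by
              apply ih
              simp only [List.length_cons, List.sum_cons] at hs ⊢
              omega
            simp [this]

lemma simplex_iter_eq_altRec (rest : List Int) : ∀ (m s : Int), 1 ≤ s →
    simplex_iter s (m :: rest) = simplex_iter_altRec s m rest rest.sum := by
  induction rest with
  | nil =>
      intro m s hs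
      unfold simplex_iter simplex_iter_altRec
      have hns : ¬ s ≤ 0 := by omega
      simp only [if_neg hns, List.sum_nil, List.length_nil, Nat.cast_zero, sub_zero]
      rw [show max 1 s = s by omega]
      by_cases hm : m ≥ s
      · rw [if_pos hm, show min m s = s by omega, PySem.List.pyRange_one_singleton]
        rfl
      · rw [if_neg hm, show min m s = m by omega, PySem.List.pyRange_one_eq_nil (by omega)]
        rfl
  | cons r rest2 ih =>
      intro m s hs
      have hns : ¬ s ≤ 0 := by omega
      unfold simplex_iter simplex_iter_altRec
      simp only [if_neg hns]
      set T : Int := (r :: rest2).sum with hT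
      set L : Int := ((r :: rest2).length : Int) with hL
      have hL1 : 1 ≤ L := by simp [hL]
      set lo : Int := max 1 (s - T) with hlo
      set hi : Int := min m (s - L) with hhi
      have hkill : ∀ i : Int, 1 ≤ i → i < 1 + min m s → (i < lo ∨ hi < i) →
          simplex_iter (s - i) (r :: rest2) = [] := by
        intro i h1 h2 h3
        apply simplex_iter_infeasible
        rcases h3 with h | h
        · right; rw [← hT]; omega
        · left; rw [← hL]; omega
      -- the tail-sum argument of the recursive call
      have hnt : T - r = rest2.sum := by simp [hT]
      by_cases hord : lo ≤ hi + 1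
      · have h1lo : 1 ≤ lo := by omega
        have hhi' : hi + 1 ≤ 1 + min m s := by omega
        rw [PySem.List.pyRange_one_append 1 lo (1 + min m s) h1lo (by omega),
            PySem.List.pyRange_one_append lo (hi + 1) (1 + min m s) hord hhi']
        rw [List.flatMap_append, List.flatMap_append]
        have hleft : (PySem.List.pyRange 1 lo 1).flatMap
            (fun i => (simplex_iter (s - i) (r :: rest2)).map (fun indices => i :: indices)) = [] := by
          rw [List.flatMap_eq_nil_iff]
          intro i hi'
          rw [PySem.List.mem_pyRange_one] at hi'
          rw [hkill i hi'.1 (by omega) (Or.inl hi'.2)]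
          rfl
        have hright : (PySem.List.pyRange (hi + 1) (1 + min m s) 1).flatMap
            (fun i => (simplex_iter (s - i) (r :: rest2)).map (fun indices => i :: indices)) = [] := by
          rw [List.flatMap_eq_nil_iff]
          intro i hi'
          rw [PySem.List.mem_pyRange_one] at hi'
          rw [hkill i (by omega) hi'.2 (Or.inr (by omega))]
          rfl
        rw [hleft, hright, List.nil_append, List.append_nil]
        rw [hnt]
        apply List.flatMap_congr
        intro i hi'
        rw [PySem.List.mem_pyRange_one] at hi'
        rw [ih r (s - i) (by omega)]
      · -- pruned range empty: everything in A's range is infeasible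
        conv_rhs => rw [PySem.List.pyRange_one_eq_nil (show hi + 1 ≤ lo by omega)]
        rw [List.flatMap_nil, List.flatMap_eq_nil_iff]
        intro i hi'
        rw [PySem.List.mem_pyRange_one] at hi'
        rw [hkill i hi'.1 hi'.2 (by omega)]
        rfl

-- ===== VERDICT (by name: the statement is the Claim_ definition above) =====
theorem simplex_iter_spec : Claim_equal_simplex_iter := by
  intro s mv _
  unfold Spec_simplex_iter
  by_cases hs : s ≤ 0
  · unfold simplex_iter simplex_iter_alt
    simp [hs]
  · match mv with
    | [] =>
        unfold simplex_iter simplex_iter_alt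
        simp [hs]
    | m :: rest =>
        rw [simplex_iter_eq_altRec rest m s (by omega)]
        unfold simplex_iter_alt
        simp [hs]
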